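-- pv_equiv track=rewrite | github.com/LeanVibe/agent-hive | .worktree-archive/product-manager-Jul-17-0156/new-worktrees/service-mesh-Jul-16-1339/notification_system.py | _generate_strategic_recommendations
-- ===== SOURCE A (Python) =====
-- from typing import Dict, List, Optional, Any
--
-- def _generate_strategic_recommendations(agent_data: List[Dict]) -> List[str]:
--     """Generate strategic recommendations."""
--     recommendations = []
--
--     # Check if agents are ahead of schedule
--     ahead_agents = [agent for agent in agent_data if agent.get('progress', 0) > 85]
--     if ahead_agents:
--         recommendations.append(f"{len(ahead_agents)} agent(s) ahead of schedule - consider additional tasks")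
--
--     # Check for scaling opportunities
--     if len(agent_data) >= 2 and all(agent.get('progress', 0) > 60 for agent in agent_data):
--         recommendations.append("Consider scaling to 4-5 agents for next sprint")
--
--     # Check for production readiness
--     complete_agents = [agent for agent in agent_data if agent.get('progress', 0) >= 100]
--     if complete_agents:
--         recommendations.append(f"{len(complete_agents)} agent(s) ready for production deployment")
--
--     return recommendations
-- ===== SOURCE B (Python) =====
-- def _generate_strategic_recommendations(agent_data):
--     """Single pass: count ahead/complete agents and track the all->60 flag, then emit messages."""
--     ahead = 0
--     complete = 0
--     all_above_60 = True
--     for agent in agent_data: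
--         p = agent.get('progress', 0)
--         if p > 85:
--             ahead += 1
--         if p >= 100:
--             complete += 1
--         if p <= 60:
--             all_above_60 = False
--     recs = []
--     if ahead:
--         recs.append(f"{ahead} agent(s) ahead of schedule - consider additional tasks")
--     if len(agent_data) >= 2 and all_above_60:
--         recs.append("Consider scaling to 4-5 agents for next sprint")
--     if complete:
--         recs.append(f"{complete} agent(s) ready for production deployment")
--     return recs
-- ===== Notes on version B (the rewrite author's own statement) =====
-- stated objective: simpler
-- what changed: Replaces A's three separate scans (two filter comprehensions and an all() generator) with one accumulating loop maintaining ahead/complete counters and an all-above-60 flag, then emits the three messages from the accumulated state.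
import Mathlib
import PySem

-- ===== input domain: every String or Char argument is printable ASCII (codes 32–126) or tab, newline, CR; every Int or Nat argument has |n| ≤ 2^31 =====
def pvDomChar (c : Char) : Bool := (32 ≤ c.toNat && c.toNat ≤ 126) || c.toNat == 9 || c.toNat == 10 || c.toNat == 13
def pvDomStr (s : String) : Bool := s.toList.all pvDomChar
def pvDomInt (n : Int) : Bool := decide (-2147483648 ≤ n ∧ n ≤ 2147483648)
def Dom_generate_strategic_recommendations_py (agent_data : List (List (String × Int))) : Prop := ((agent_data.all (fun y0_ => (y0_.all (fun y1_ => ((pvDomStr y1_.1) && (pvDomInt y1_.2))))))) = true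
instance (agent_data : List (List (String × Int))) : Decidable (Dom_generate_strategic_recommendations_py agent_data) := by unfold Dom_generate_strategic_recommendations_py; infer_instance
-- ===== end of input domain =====

-- B replaces A's three separate scans with one accumulating loop (objective: simpler decomposition).

-- ===== PORT A =====
-- agent.get('progress', 0)
def pvProg (agent : List (String × Int)) : Int :=
  (PySem.Dict.ofList agent).getD "progress" 0

def generate_strategic_recommendations_py (agent_data : List (List (String × Int))) : List String :=
  let recommendations : List String := []
  let ahead_agents := agent_data.filter (fun agent => decide (pvProg agent > 85))
  let recommendations :=
    if ahead_agents ≠ [] then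
      recommendations ++ [PySem.Int.toStr (ahead_agents.length : Int) ++ " agent(s) ahead of schedule - consider additional tasks"]
    else recommendations
  let recommendations :=
    if agent_data.length ≥ 2 ∧ agent_data.all (fun agent => decide (pvProg agent > 60)) then
      recommendations ++ ["Consider scaling to 4-5 agents for next sprint"]
    else recommendations
  let complete_agents := agent_data.filter (fun agent => decide (pvProg agent ≥ 100))
  let recommendations :=
    if complete_agents ≠ [] then
      recommendations ++ [PySem.Int.toStr (complete_agents.length : Int) ++ " agent(s) ready for production deployment"]
    else recommendations
  recommendations

-- ===== PORT B =====
-- the loop body of Source B: state = (ahead, complete, all_above_60)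
def pvStep (s : Int × Int × Bool) (agent : List (String × Int)) : Int × Int × Bool :=
  let p := pvProg agent
  (s.1 + (if p > 85 then 1 else 0),
   s.2.1 + (if p ≥ 100 then 1 else 0),
   if p ≤ 60 then false else s.2.2)

def generate_strategic_recommendations_py_alt (agent_data : List (List (String × Int))) : List String :=
  let s := agent_data.foldl pvStep (0, 0, true)
  let recs : List String := []
  let recs := if s.1 ≠ 0 then
      recs ++ [PySem.Int.toStr s.1 ++ " agent(s) ahead of schedule - consider additional tasks"]
    else recs
  let recs := if agent_data.length ≥ 2 ∧ s.2.2 = true then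
      recs ++ ["Consider scaling to 4-5 agents for next sprint"]
    else recs
  let recs := if s.2.1 ≠ 0 then
      recs ++ [PySem.Int.toStr s.2.1 ++ " agent(s) ready for production deployment"]
    else recs
  recs

-- ===== PRECONDITION & SPEC =====
def Spec_generate_strategic_recommendations_py (agent_data : List (List (String × Int))) (out : List String) : Prop := out = generate_strategic_recommendations_py_alt agent_data
instance (agent_data : List (List (String × Int))) (out : List String) : Decidable (Spec_generate_strategic_recommendations_py agent_data out) := by unfold Spec_generate_strategic_recommendations_py; infer_instance

-- ===== CLAIM (what is proved, stated in full; the proofs are below) =====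
def Claim_equal_generate_strategic_recommendations_py : Prop := ∀ (agent_data : List (List (String × Int))), Dom_generate_strategic_recommendations_py agent_data → Spec_generate_strategic_recommendations_py agent_data (generate_strategic_recommendations_py agent_data)

-- ===== LEMMAS AND PROOFS =====

theorem pvFold_spec (l : List (List (String × Int))) (a c : Int) (b : Bool) :
    l.foldl pvStep (a, c, b) =
      (a + ((l.filter (fun agent => decide (pvProg agent > 85))).length : Int),
       c + ((l.filter (fun agent => decide (pvProg agent ≥ 100))).length : Int),
       b && l.all (fun agent => decide (pvProg agent > 60))) := by
  induction l generalizing a c b with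
  | nil => simp
  | cons x xs ih =>
      simp only [List.foldl_cons, List.filter_cons, List.all_cons, pvStep]
      rw [ih]
      by_cases h85 : pvProg x > 85 <;> by_cases h100 : pvProg x ≥ 100 <;>
        by_cases h60 : pvProg x ≤ 60 <;>
        simp [h85, h100, h60, Prod.ext_iff] <;> first | omega | (simp [not_le.mp h60] <;> omega)

-- ===== VERDICT (by name: the statement is the Claim_ definition above) =====
theorem generate_strategic_recommendations_py_spec : Claim_equal_generate_strategic_recommendations_py := by
  intro agent_data _
  unfold Spec_generate_strategic_recommendations_py
  unfold generate_strategic_recommendations_py generate_strategic_recommendations_py_alt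
  rw [pvFold_spec]
  simp only [zero_add, Bool.true_and]
  have h1 : (((agent_data.filter (fun agent => decide (pvProg agent > 85))).length : Int) ≠ 0) ↔
      agent_data.filter (fun agent => decide (pvProg agent > 85)) ≠ [] := by
    simp [List.length_eq_zero_iff]
  have h2 : (((agent_data.filter (fun agent => decide (pvProg agent ≥ 100))).length : Int) ≠ 0) ↔
      agent_data.filter (fun agent => decide (pvProg agent ≥ 100)) ≠ [] := by
    simp [List.length_eq_zero_iff]
  simp only [h1, h2]
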